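-- pv_equiv track=rewrite | github.com/braekevelt/advent-of-code-2023 | src/13/2.py | getMirrors
-- ===== SOURCE A (Python) =====
-- def getMirrors(lines):
--     for linesBefore in range(1, len(lines)):
--         if all(
--             lines[linesBefore - 1 - index] == lines[linesBefore + index]
--             for index in range(linesBefore)
--             if linesBefore + index< len(lines)
--         ):
--             yield linesBefore
-- ===== SOURCE B (Python) =====
-- def getMirrors(lines):
--     # Manacher's algorithm for even-length palindromes: compute every
--     # fold's palindromic radius in overall O(n) comparisons by reusing,
--     # via the mirror of the rightmost known palindrome, radii already
--     # computed; a fold is valid iff its radius reaches the nearer edge.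
--     lines = list(lines)
--     n = len(lines)
--     d = [0]            # d[c] = even-palindrome radius centered at gap c
--     l = r = 0          # rightmost known even palindrome lines[l:r]
--     res = []
--     for i in range(1, n):
--         k = min(r - i, d[l + r - i]) if i < r else 0
--         while k < i and i + k < n and lines[i - k - 1] == lines[i + k]:
--             k += 1
--         d.append(k)
--         if i + k > r:
--             l, r = i - k, i + k
--         if k == min(i, n - i):
--             res.append(i)
--     return res
-- ===== Notes on version B (the rewrite author's own statement) =====
-- stated objective: faster
-- what changed: B replaces A's independent per-fold scan of all mirrored pairs by Manacher's even-palindrome algorithm: one left-to-right pass computes every fold's palindromic radius, seeding each expansion from the mirrored radius inside the rightmost known palindrome, and a fold is emitted iff its radius reaches the nearer edge.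
import Mathlib
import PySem

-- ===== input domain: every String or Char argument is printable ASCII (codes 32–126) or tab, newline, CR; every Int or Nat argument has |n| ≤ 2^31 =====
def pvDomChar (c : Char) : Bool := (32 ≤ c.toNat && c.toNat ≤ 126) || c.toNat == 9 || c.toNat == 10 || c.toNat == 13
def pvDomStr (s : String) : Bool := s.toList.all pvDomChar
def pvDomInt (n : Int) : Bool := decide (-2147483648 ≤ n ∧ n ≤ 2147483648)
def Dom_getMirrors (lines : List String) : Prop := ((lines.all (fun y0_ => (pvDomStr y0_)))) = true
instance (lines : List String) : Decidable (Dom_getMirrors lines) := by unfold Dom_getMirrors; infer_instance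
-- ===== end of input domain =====

-- B replaces A's per-fold pairwise scan by Manacher's even-palindrome algorithm:
-- radii are computed once, reusing mirrored radii inside the rightmost known palindrome,
-- and a fold is valid iff its radius reaches the nearer edge.

-- ===== PORT A =====
-- A: for linesBefore in range(1, len(lines)): yield it if all mirrored pairs (that exist) are equal.
def getMirrors (lines : List String) : List Int :=
  (PySem.List.pyRange 1 (lines.length : Int) 1).filter (fun linesBefore =>
    ((PySem.List.pyRange 0 linesBefore 1).filter
        (fun index => decide (linesBefore + index < (lines.length : Int)))).all
      (fun index =>
        PySem.List.pyGetD lines (linesBefore - 1 - index) "" ==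
        PySem.List.pyGetD lines (linesBefore + index) ""))

-- ===== PORT B =====
-- the `while k < i and i + k < n and lines[i-k-1] == lines[i+k]: k += 1` loop
def pvExpand (a : List String) (n i k : Nat) : Nat :=
  if k < i ∧ i + k < n ∧ (a.getD (i - k - 1) "" == a.getD (i + k) "") = true then
    pvExpand a n i (k + 1)
  else k
termination_by n - k
decreasing_by omega

-- the `for i in range(1, n)` loop with state (d, l, r, res)
def pvMLoop (a : List String) (n i : Nat) (ds : List Nat) (l r : Nat) (res : List Int) : List Int :=
  if i < n then
    let k0 := if i < r then min (r - i) (ds.getD (l + r - i) 0) else 0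
    let k := pvExpand a n i k0
    let ds' := ds ++ [k]
    let lr := if r < i + k then (i - k, i + k) else (l, r)
    let res' := if k = min i (n - i) then res ++ [(i : Int)] else res
    pvMLoop a n (i + 1) ds' lr.1 lr.2 res'
  else res
termination_by n - i
decreasing_by omega

def getMirrors_alt (lines : List String) : List Int :=
  pvMLoop lines lines.length 1 [0] 0 0 []

-- ===== PRECONDITION & SPEC =====
def Spec_getMirrors (lines : List String) (out : List Int) : Prop := out = getMirrors_alt lines
instance (lines : List String) (out : List Int) : Decidable (Spec_getMirrors lines out) := by unfold Spec_getMirrors; infer_instance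

-- ===== CLAIM (what is proved, stated in full; the proofs are below) =====
def Claim_equal_getMirrors : Prop := ∀ (lines : List String), Dom_getMirrors lines → Spec_getMirrors lines (getMirrors lines)

-- ===== LEMMAS AND PROOFS =====

-- "k is a feasible radius at center i": bounds plus all mirrored pairs equal
def pvP (a : List String) (n i k : Nat) : Prop :=
  k ≤ i ∧ i + k ≤ n ∧ ∀ j < k, a.getD (i - j - 1) "" = a.getD (i + j) ""

lemma pvExpand_P (a : List String) (n i k : Nat) (h : pvP a n i k) :
    pvP a n i (pvExpand a n i k) := by
  unfold pvExpand
  split_ifs with hc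
  · apply pvExpand_P
    obtain ⟨h1, h2, h3⟩ := h
    refine ⟨by omega, by omega, ?_⟩
    intro j hj
    rcases Nat.lt_succ_iff_lt_or_eq.mp hj with hj' | rfl
    · exact h3 j hj'
    · exact beq_iff_eq.mp hc.2.2
  · exact h
termination_by n - k
decreasing_by omega

lemma pvExpand_stop (a : List String) (n i k : Nat) :
    ¬ (pvExpand a n i k < i ∧ i + pvExpand a n i k < n ∧
       (a.getD (i - pvExpand a n i k - 1) "" == a.getD (i + pvExpand a n i k) "") = true) := by
  unfold pvExpand
  split_ifs with hc
  · exact pvExpand_stop a n i (k + 1)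
  · simpa using hc
termination_by n - k
decreasing_by omega

-- expanding from any feasible start below the maximum reaches the same maximum
lemma pvExpand_eq_of_le (a : List String) (n i : Nat) (m k : Nat)
    (hm : pvP a n i m)
    (hstop : ¬ (m < i ∧ i + m < n ∧ (a.getD (i - m - 1) "" == a.getD (i + m) "") = true))
    (hk : k ≤ m) : pvExpand a n i k = m := by
  unfold pvExpand
  rcases Nat.lt_or_ge k m with hlt | hge
  · obtain ⟨h1, h2, h3⟩ := hm
    rw [if_pos ⟨by omega, by omega, beq_iff_eq.mpr (h3 k hlt)⟩]
    exact pvExpand_eq_of_le a n i m (k + 1) ⟨h1, h2, h3⟩ hstop (by omega)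
  · have : k = m := by omega
    subst this
    rw [if_neg hstop]
termination_by n - k
decreasing_by omega

-- any feasible radius is at most the expanded-from-zero one
lemma pvP_le_expand (a : List String) (n i k : Nat) (hi : i ≤ n) (h : pvP a n i k) :
    k ≤ pvExpand a n i 0 := by
  by_contra hgt
  rw [Nat.not_le] at hgt
  set m := pvExpand a n i 0 with hm
  have hPm : pvP a n i m := pvExpand_P a n i 0 ⟨Nat.zero_le i, by omega, by omega⟩
  have hstop := pvExpand_stop a n i 0
  rw [← hm] at hstop
  obtain ⟨h1, h2, h3⟩ := h
  exact hstop ⟨by omega, by omega, beq_iff_eq.mpr (h3 m hgt)⟩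

-- the maximal radius, used only in the proofs
def pvR (a : List String) (n i : Nat) : Nat := pvExpand a n i 0

lemma pvExpand_eq_R (a : List String) (n i k : Nat) (hi : i ≤ n)
    (hk : k ≤ pvR a n i) : pvExpand a n i k = pvR a n i := by
  apply pvExpand_eq_of_le a n i (pvR a n i) k
  · exact pvExpand_P a n i 0 ⟨Nat.zero_le i, by omega, by omega⟩
  · exact pvExpand_stop a n i 0
  · exact hk

-- the mirror step: inside a known palindrome the capped mirrored radius is feasible
lemma pvMirror (a : List String) (n c k i : Nat) (hck : pvP a n c k)
    (hci : c < i) (hir : i < c + k) :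
    pvP a n i (min (c + k - i) (pvR a n (2 * c - i))) := by
  obtain ⟨hkc, hkn, hpal⟩ := hck
  set i' := 2 * c - i with hi'def
  have hi'c : i' < c := by omega
  have hRi' : pvP a n i' (pvR a n i') :=
    pvExpand_P a n i' 0 ⟨Nat.zero_le i', by omega, by omega⟩
  obtain ⟨hR1, hR2, hRpal⟩ := hRi'
  set K := min (c + k - i) (pvR a n i') with hK
  refine ⟨by omega, by omega, ?_⟩
  intro j hj
  have hjK1 : j < c + k - i := by omega
  have hjK2 : j < pvR a n i' := by omega
  -- a[i - j - 1] = a[i' + j] by the palindrome at c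
  have e1 : a.getD (i - j - 1) "" = a.getD (i' + j) "" := by
    by_cases hcase : i - j - 1 ≥ c
    · -- i - j - 1 = c + t, t = i - c - j - 1 < k
      have ht : i - j - 1 = c + (i - c - j - 1) := by omega
      have ht2 : i' + j = c - (i - c - j - 1) - 1 := by omega
      rw [ht, ht2]
      exact (hpal (i - c - j - 1) (by omega)).symm
    · -- i - j - 1 = c - s - 1, s = j - (i - c) ≥ 0, s < k
      have ht : i - j - 1 = c - (j - (i - c)) - 1 := by omega
      have ht2 : i' + j = c + (j - (i - c)) := by omega
      rw [ht, ht2]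
      exact hpal (j - (i - c)) (by omega)
  -- a[i + j] = a[i' - j - 1] by the palindrome at c
  have e2 : a.getD (i + j) "" = a.getD (i' - j - 1) "" := by
    have ht : i + j = c + (i - c + j) := by omega
    have ht2 : i' - j - 1 = c - (i - c + j) - 1 := by omega
    rw [ht, ht2]
    exact (hpal (i - c + j) (by omega)).symm
  -- a[i' - j - 1] = a[i' + j] by the mirrored radius
  rw [e1, e2, ← hRpal j hjK2]

-- the naive per-fold condition (pointwise form shared by both ports)
def pvCondN (a : List String) (i : Nat) : Bool :=
  decide (∀ j < min i (a.length - i), a.getD (i - j - 1) "" = a.getD (i + j) "")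

-- B's membership test "k = min i (n - i)" ⟺ the naive condition
lemma pvR_eq_min_iff (a : List String) (i : Nat) (h2 : i < a.length) :
    pvR a a.length i = min i (a.length - i) ↔ pvCondN a i = true := by
  simp only [pvCondN, decide_eq_true_eq]
  have hRP : pvP a a.length i (pvR a a.length i) :=
    pvExpand_P a a.length i 0 ⟨Nat.zero_le i, by omega, by omega⟩
  obtain ⟨h1, h2', h3⟩ := hRP
  constructor
  · intro hR j hj
    exact h3 j (by omega)
  · intro hc
    have hfeas : pvP a a.length i (min i (a.length - i)) :=
      ⟨Nat.min_le_left _ _, by omega, fun j hj => hc j hj⟩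
    have := pvP_le_expand a a.length i _ (by omega) hfeas
    have hdef : pvExpand a a.length i 0 = pvR a a.length i := rfl
    omega

-- filtering an index range by an upper bound keeps an initial segment
lemma pvFilterRange (b c : Nat) :
    (PySem.List.pyRange 0 (b:Int) 1).filter (fun x => decide (x < (c:Int))) =
      PySem.List.pyRange 0 ((min b c : Nat) : Int) 1 := by
  rw [PySem.List.pyRange_one_append 0 ((min b c : Nat) : Int) (b:Int)
        (by positivity) (by exact_mod_cast Nat.min_le_left b c)]
  rw [List.filter_append]
  have h1 : (PySem.List.pyRange 0 ((min b c : Nat) : Int) 1).filter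
      (fun x => decide (x < (c:Int))) = PySem.List.pyRange 0 ((min b c : Nat) : Int) 1 := by
    apply List.filter_eq_self.mpr
    intro x hx
    have := PySem.List.mem_pyRange_one.mp hx
    simp only [decide_eq_true_eq]
    omega
  have h2 : (PySem.List.pyRange ((min b c : Nat) : Int) (b:Int) 1).filter
      (fun x => decide (x < (c:Int))) = [] := by
    apply List.filter_eq_nil_iff.mpr
    intro x hx
    have := PySem.List.mem_pyRange_one.mp hx
    simp only [decide_eq_true_eq]
    omega
  rw [h1, h2, List.append_nil]

-- A's per-fold check, characterised pointwise
lemma pvCondA_iff (lines : List String) (L : Nat) (h2 : L < lines.length) :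
    ((((PySem.List.pyRange 0 ((L:Int)) 1).filter
        (fun index => decide ((L:Int) + index < (lines.length : Int)))).all
      (fun index =>
        PySem.List.pyGetD lines ((L:Int) - 1 - index) "" ==
        PySem.List.pyGetD lines ((L:Int) + index) "")) = true)
    ↔ pvCondN lines L = true := by
  simp only [pvCondN, decide_eq_true_eq]
  have hpred : (PySem.List.pyRange 0 ((L:Int)) 1).filter
      (fun index => decide ((L:Int) + index < (lines.length : Int))) =
      (PySem.List.pyRange 0 ((L:Int)) 1).filter
      (fun x => decide (x < ((lines.length - L : Nat) : Int))) := by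
    apply List.filter_congr
    intro x hx
    have := PySem.List.mem_pyRange_one.mp hx
    simp only [decide_eq_decide]
    omega
  rw [hpred, pvFilterRange, List.all_eq_true]
  set K := min L (lines.length - L) with hK
  have hKL : K ≤ L := Nat.min_le_left _ _
  have hKR : K ≤ lines.length - L := Nat.min_le_right _ _
  constructor
  · intro h j hj
    have hmem : (j:Int) ∈ PySem.List.pyRange 0 (K : Int) 1 :=
      PySem.List.mem_pyRange_one.mpr ⟨by positivity, by exact_mod_cast hj⟩
    have hthis := h _ hmem
    rw [beq_iff_eq] at hthis
    have e1 : (L:Int) - 1 - (j:Int) = ((L - j - 1 : Nat) : Int) := by omega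
    have e2 : (L:Int) + (j:Int) = ((L + j : Nat) : Int) := by push_cast; ring
    rw [e1, e2, PySem.List.pyGetD_natCast, PySem.List.pyGetD_natCast] at hthis
    exact hthis
  · intro h x hx
    obtain ⟨hx0, hxlt⟩ := PySem.List.mem_pyRange_one.mp hx
    have hj := h x.toNat (by omega)
    rw [beq_iff_eq]
    have e1 : (L:Int) - 1 - x = ((L - x.toNat - 1 : Nat) : Int) := by omega
    have e2 : (L:Int) + x = ((L + x.toNat : Nat) : Int) := by omega
    rw [e1, e2, PySem.List.pyGetD_natCast, PySem.List.pyGetD_natCast]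
    exact hj

-- the loop invariant: radii so far are correct, (l, r) is a feasible palindrome with
-- center below i, and res carries A's verdicts for folds below i
lemma pvMLoop_spec (a : List String) (i : Nat) (ds : List Nat) (l r : Nat) (res : List Int)
    (hi : 1 ≤ i)
    (hlen : ds.length = i)
    (hds : ∀ j < i, ds.getD j 0 = pvR a a.length j)
    (hlr : ∃ c k, c < i ∧ pvP a a.length c k ∧ k ≤ c ∧ l = c - k ∧ r = c + k) :
    pvMLoop a a.length i ds l r res =
      res ++ (PySem.List.pyRange (i : Int) (a.length : Int) 1).filter (fun x =>
        pvCondN a x.toNat) := by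
  by_cases hin : i < a.length
  · obtain ⟨c, k, hc, hPck, hkc, hl, hr⟩ := hlr
    have hn := hPck.2.1
    -- the starting radius is a feasible lower bound of the true radius at i
    have hstart : (if i < r then min (r - i) (ds.getD (l + r - i) 0) else 0) ≤ pvR a a.length i := by
      split_ifs with hir
      · have hmem : l + r - i = 2 * c - i := by omega
        have hmir := pvMirror a a.length c k i hPck hc (by omega)
        have hle := pvP_le_expand a a.length i _ (by omega) hmir
        have hdef : pvExpand a a.length i 0 = pvR a a.length i := rfl
        have hds' : ds.getD (l + r - i) 0 = pvR a a.length (2 * c - i) := by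
          rw [hmem]; exact hds _ (by omega)
        rw [hds', hr]
        omega
      · exact Nat.zero_le _
    set k' := pvExpand a a.length i
        (if i < r then min (r - i) (ds.getD (l + r - i) 0) else 0) with hk'
    have hkR : k' = pvR a a.length i := pvExpand_eq_R a a.length i _ (by omega) hstart
    have hPk' : pvP a a.length i k' := by
      rw [hkR]
      exact pvExpand_P a a.length i 0 ⟨Nat.zero_le i, by omega, by omega⟩
    have hrec := pvMLoop_spec a (i + 1) (ds ++ [k'])
        (if r < i + k' then (i - k', i + k') else (l, r)).1
        (if r < i + k' then (i - k', i + k') else (l, r)).2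
        (if k' = min i (a.length - i) then res ++ [(i : Int)] else res)
        (by omega)
        (by simp [hlen])
        ?_ ?_
    · rw [pvMLoop, if_pos hin]
      simp only
      rw [← hk', hrec]
      conv_rhs => rw [PySem.List.pyRange_one_cons (by exact_mod_cast hin), List.filter_cons]
      have htoNat : ((i : Int)).toNat = i := by omega
      rw [htoNat]
      rw [Nat.cast_add, Nat.cast_one] at hrec
      by_cases hcond : pvCondN a i = true
      · have hk'min : k' = min i (a.length - i) := by
          rw [hkR]; exact (pvR_eq_min_iff a i hin).mpr hcond
        rw [if_pos hk'min, if_pos hcond]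
        push_cast
        rw [List.append_assoc, List.singleton_append]
      · have hk'min : ¬ k' = min i (a.length - i) := by
          rw [hkR]; intro h; exact hcond ((pvR_eq_min_iff a i hin).mp h)
        rw [if_neg hk'min, if_neg hcond]
        push_cast
        rfl
    · -- radii stay correct
      intro j hj
      rcases Nat.lt_succ_iff_lt_or_eq.mp hj with hj' | rfl
      · rw [List.getD_append ds [k'] 0 j (by omega)]
        exact hds j hj'
      · rw [← hkR]
        simp [List.getD_eq_getElem?_getD, hlen]
    · -- the (l, r) pair stays a feasible palindrome with center < i+1
      by_cases hnew : r < i + k'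
      · exact ⟨i, k', by omega, hPk', hPk'.1, by simp [hnew], by simp [hnew]⟩
      · exact ⟨c, k, by omega, hPck, hkc, by rw [if_neg hnew]; exact hl,
          by rw [if_neg hnew]; exact hr⟩
  · rw [pvMLoop, if_neg hin]
    rw [PySem.List.pyRange_one_eq_nil (by omega), List.filter_nil, List.append_nil]
termination_by a.length - i
decreasing_by omega

-- ===== VERDICT (by name: the statement is the Claim_ definition above) =====
theorem getMirrors_spec : Claim_equal_getMirrors := by
  intro lines _
  show getMirrors lines = getMirrors_alt lines
  unfold getMirrors getMirrors_alt
  rw [pvMLoop_spec lines 1 [0] 0 0 [] (le_refl 1) rfl ?_ ?_]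
  · rw [List.nil_append]
    apply List.filter_congr
    intro x hx
    obtain ⟨hx1, hx2⟩ := PySem.List.mem_pyRange_one.mp hx
    have hxL : x = ((x.toNat : Nat) : Int) := by omega
    rw [hxL, Bool.eq_iff_iff]
    exact (pvCondA_iff lines x.toNat (by omega)).trans
      ⟨fun h => h, fun h => h⟩
  · intro j hj
    have : j = 0 := by omega
    subst this
    unfold pvR pvExpand
    rw [if_neg (by omega)]
    rfl
  · exact ⟨0, 0, Nat.zero_lt_one, ⟨le_refl 0, by omega, by omega⟩, le_refl 0, rfl, rfl⟩
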